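-- pv_equiv track=rewrite | github.com/ezzio/project_management_horenso | ref-system/Source code/DD/quanlycongviec-backend/src/common/utils.py | change_dict_distance_format
-- ===== SOURCE A (Python) =====
-- def change_dict_distance_format(l):
--     list_out = []
--     list_tmp = []
--     for i in range(0, len(l)):
--         if i == 0:
--             k_last = l[i].get("flag")
--         k = l[i].get("flag")
--         if k != k_last:
--             tmp = l[i].copy()
--             tmp["flag"] = k_last
--             list_tmp.append(tmp)
--             list_out.append(list_tmp)
--             k_last = k
--             list_tmp = [l[i]]
--         else:
--             list_tmp.append(l[i])
--     list_out.append(list_tmp)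
--     return list_out
-- ===== SOURCE B (Python) =====
-- def change_dict_distance_format(l):
--     # Pass 1: split l into runs of consecutive equal "flag" values.
--     runs = []
--     for d in l:
--         if runs and runs[-1][0].get("flag") == d.get("flag"):
--             runs[-1].append(d)
--         else:
--             runs.append([d])
--     if not runs:
--         return [[]]
--     # Pass 2: every run except the last gets a bridge element: a copy of the
--     # next run's first dict with its flag set to this run's flag.
--     out = []
--     for cur, nxt in zip(runs, runs[1:]):
--         bridge = dict(nxt[0])
--         bridge["flag"] = cur[0].get("flag")
--         out.append(cur + [bridge])
--     out.append(runs[-1])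
--     return out
-- ===== Notes on version B (the rewrite author's own statement) =====
-- stated objective: simpler
-- what changed: B first splits the list into runs of consecutive equal flags in one pass, then in a second pass appends to each run (except the last) a bridge copy of the next run's first dict carrying this run's flag, replacing A's single index loop over three pieces of mutable state; Pre_ excludes inputs where a flag-less dict is followed by a dict with a flag, since there A returns a dict whose 'flag' value is None, not an int of the declared type.
import Mathlib
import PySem

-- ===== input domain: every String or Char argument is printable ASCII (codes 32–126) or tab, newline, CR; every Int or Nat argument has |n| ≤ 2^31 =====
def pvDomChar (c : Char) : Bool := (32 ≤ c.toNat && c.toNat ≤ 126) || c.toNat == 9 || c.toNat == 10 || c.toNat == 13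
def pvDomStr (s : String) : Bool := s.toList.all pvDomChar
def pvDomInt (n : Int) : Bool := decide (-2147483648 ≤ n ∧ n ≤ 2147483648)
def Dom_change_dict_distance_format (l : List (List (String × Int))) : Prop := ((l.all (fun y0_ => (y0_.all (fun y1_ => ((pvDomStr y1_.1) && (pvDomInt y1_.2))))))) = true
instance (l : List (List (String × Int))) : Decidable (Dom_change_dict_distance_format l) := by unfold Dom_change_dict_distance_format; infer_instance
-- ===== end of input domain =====

-- B builds the runs of consecutive equal flags in one pass and adds the bridge elements in a
-- second pass, instead of A's index loop over (list_out, list_tmp, k_last) state; objective: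
-- simpler decomposition, same cost. Equivalence is about the return value; no mutation of l.

-- shared dict primitives (Python d.get("flag") and d["flag"] = v on an association list)
def pvGetFlag (d : List (String × Int)) : Option Int :=
  (d.find? (fun p => p.1 == "flag")).map (·.2)

def pvSetFlag (d : List (String × Int)) (v : Int) : List (String × Int) :=
  match d with
  | [] => [("flag", v)]
  | p :: rest => if p.1 == "flag" then ("flag", v) :: rest else p :: pvSetFlag rest v

-- ===== PORT A =====
-- index loop over range(0, len(l)) with state (list_out, list_tmp, k_last).
-- k_last is uninitialised before i = 0 and always overwritten there; modelled as `none`.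
-- `tmp["flag"] = k_last` writes Python None when k_last is None (a non-int dict value,
-- excluded by Pre_); the port writes (k_last.getD 0) there, exact whenever k_last = some _.
def change_dict_distance_format (l : List (List (String × Int))) : List (List (List (String × Int))) :=
  let st :=
    (PySem.List.pyRange 0 (l.length : Int) 1).foldl
      (fun (st : List (List (List (String × Int))) × List (List (String × Int)) × Option Int) i =>
        let d := PySem.List.pyGetD l i []
        let kLast := if i = 0 then pvGetFlag d else st.2.2
        let k := pvGetFlag d
        if k ≠ kLast then
          (st.1 ++ [st.2.1 ++ [pvSetFlag d (kLast.getD 0)]], ([d], k))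
        else
          (st.1, (st.2.1 ++ [d], kLast)))
      ([], ([], none))
  st.1 ++ [st.2.1]

-- ===== PORT B =====
-- pass 1: fold building the runs (append to the last run or start a new one);
-- pass 2: zip runs with runs.tail to add the bridge elements, then the last run.
-- `bridge["flag"] = cur[0].get("flag")` writes Python None when cur[0] has no flag
-- (excluded by Pre_); the port writes the .getD 0 form there.
def change_dict_distance_format_alt (l : List (List (String × Int))) : List (List (List (String × Int))) :=
  let runs :=
    l.foldl
      (fun (runs : List (List (List (String × Int)))) d =>
        if runs ≠ [] ∧ pvGetFlag ((runs.getLastD []).headD []) = pvGetFlag d then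
          runs.dropLast ++ [runs.getLastD [] ++ [d]]
        else
          runs ++ [[d]])
      []
  if runs = [] then [[]]
  else
    (runs.zip runs.tail).map
      (fun p => p.1 ++ [pvSetFlag (p.2.headD []) ((pvGetFlag (p.1.headD [])).getD 0)])
      ++ [runs.getLastD []]

-- ===== PRECONDITION & SPEC =====
-- Pre_ excludes inputs where a dict lacking the "flag" key is immediately followed by a dict
-- with a different flag: exactly there A returns a dict carrying the non-int value None
-- (tmp["flag"] = k_last with k_last None), which is not a value of the declared type.
def Pre_change_dict_distance_format (l : List (List (String × Int))) : Prop :=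
  ∀ p ∈ l.zip l.tail, pvGetFlag p.1 = none → pvGetFlag p.2 = none
instance (l : List (List (String × Int))) : Decidable (Pre_change_dict_distance_format l) := by
  unfold Pre_change_dict_distance_format; infer_instance

def pvWitness_change_dict_distance_format : (List (List (String × Int))) :=
  [[("flag", 1)], [("flag", 2)], [("flag", 2)]]

def Spec_change_dict_distance_format (l : List (List (String × Int))) (out : List (List (List (String × Int)))) : Prop := out = change_dict_distance_format_alt l
instance (l : List (List (String × Int))) (out : List (List (List (String × Int)))) : Decidable (Spec_change_dict_distance_format l out) := by unfold Spec_change_dict_distance_format; infer_instance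

-- ===== CLAIM (what is proved, stated in full; the proofs are below) =====
def Claim_equal_change_dict_distance_format : Prop := ∀ (l : List (List (String × Int))), Dom_change_dict_distance_format l → Pre_change_dict_distance_format l → Spec_change_dict_distance_format l (change_dict_distance_format l)

-- ===== LEMMAS AND PROOFS =====

-- reference form: the runs still to be emitted, given the current run's flag k and prefix tmp
def pvConsume (k : Option Int) (tmp : List (List (String × Int))) :
    List (List (String × Int)) → List (List (List (String × Int)))
  | [] => [tmp]
  | d :: rest =>
      if pvGetFlag d ≠ k then
        (tmp ++ [pvSetFlag d (k.getD 0)]) :: pvConsume (pvGetFlag d) [d] rest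
      else
        pvConsume k (tmp ++ [d]) rest

-- A's loop body for every i ≥ 1 (the i = 0 branch dropped), as a function of the element
def pvStepA (st : List (List (List (String × Int))) × List (List (String × Int)) × Option Int)
    (d : List (String × Int)) :
    List (List (List (String × Int))) × List (List (String × Int)) × Option Int :=
  if pvGetFlag d ≠ st.2.2 then
    (st.1 ++ [st.2.1 ++ [pvSetFlag d (st.2.2.getD 0)]], ([d], pvGetFlag d))
  else
    (st.1, (st.2.1 ++ [d], st.2.2))

theorem pvFoldA_eq_consume (rest : List (List (String × Int))) :
    ∀ (out : List (List (List (String × Int)))) (tmp : List (List (String × Int))) (k : Option Int),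
      (rest.foldl pvStepA (out, (tmp, k))).1 ++ [(rest.foldl pvStepA (out, (tmp, k))).2.1] =
        out ++ pvConsume k tmp rest := by
  induction rest with
  | nil => intro out tmp k; simp [pvConsume]
  | cons d rest ih =>
      intro out tmp k
      simp only [List.foldl_cons, pvStepA, pvConsume]
      split_ifs with h
      · rw [ih]; simp
      · rw [ih]

theorem pvFoldA_drop_first (xs : List (List (String × Int))) (a : Int) (ha : 1 ≤ a)
    (st0 : List (List (List (String × Int))) × List (List (String × Int)) × Option Int) :
    (PySem.List.pyRange a (xs.length : Int) 1).foldl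
      (fun (st : List (List (List (String × Int))) × List (List (String × Int)) × Option Int) i =>
        if pvGetFlag (PySem.List.pyGetD xs i []) ≠
            (if i = 0 then pvGetFlag (PySem.List.pyGetD xs i []) else st.2.2) then
          (st.1 ++ [st.2.1 ++ [pvSetFlag (PySem.List.pyGetD xs i [])
              ((if i = 0 then pvGetFlag (PySem.List.pyGetD xs i []) else st.2.2).getD 0)]],
            ([PySem.List.pyGetD xs i []], pvGetFlag (PySem.List.pyGetD xs i [])))
        else
          (st.1, (st.2.1 ++ [PySem.List.pyGetD xs i []],
            if i = 0 then pvGetFlag (PySem.List.pyGetD xs i []) else st.2.2)))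
      st0
    = (xs.drop a.toNat).foldl pvStepA st0 := by
  refine Eq.trans (PySem.List.foldl_congr_mem _ _
      (fun st i => pvStepA st (PySem.List.pyGetD xs i [])) st0 ?_)
    (PySem.List.foldl_pyRange_pyGetD' xs [] pvStepA st0 (a := a) (by omega))
  intro acc x hx
  have hx1 := (PySem.List.mem_pyRange_one.mp hx).1
  have hne : ¬ x = 0 := by omega
  simp [pvStepA, hne]

-- B, pass 1 in reference form: the runs of consecutive equal flags, starting from run cur
def pvRunsFrom (cur : List (List (String × Int))) :
    List (List (String × Int)) → List (List (List (String × Int)))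
  | [] => [cur]
  | d :: rest =>
      if pvGetFlag d = pvGetFlag (cur.headD []) then pvRunsFrom (cur ++ [d]) rest
      else cur :: pvRunsFrom [d] rest

-- B, pass 2 in reference form
def pvEmit : List (List (List (String × Int))) → List (List (List (String × Int)))
  | [] => [[]]
  | [r] => [r]
  | r :: r2 :: more =>
      (r ++ [pvSetFlag (r2.headD []) ((pvGetFlag (r.headD [])).getD 0)]) :: pvEmit (r2 :: more)

theorem headD_append {α : Type} (cur : List α) (xs : List α) (a : α) (h : cur ≠ []) :
    (cur ++ xs).headD a = cur.headD a := by
  cases cur with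
  | nil => exact absurd rfl h
  | cons c cs => simp

theorem pvRunsFrom_ne_nil (rest : List (List (String × Int))) :
    ∀ cur, pvRunsFrom cur rest ≠ [] := by
  induction rest with
  | nil => intro cur; simp [pvRunsFrom]
  | cons d rest ih =>
      intro cur
      simp only [pvRunsFrom]
      split_ifs with h
      · exact ih (cur ++ [d])
      · simp

theorem pvRunsFrom_head (rest : List (List (String × Int))) :
    ∀ cur, cur ≠ [] → ((pvRunsFrom cur rest).headD []).headD ([] : List (String × Int)) = cur.headD [] := by
  induction rest with
  | nil => intro cur _; simp [pvRunsFrom]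
  | cons d rest ih =>
      intro cur hcur
      simp only [pvRunsFrom]
      split_ifs with h
      · rw [ih (cur ++ [d]) (by simp), headD_append _ _ _ hcur]
      · simp

theorem pvFoldB_eq_runsFrom (rest : List (List (String × Int))) :
    ∀ (acc : List (List (List (String × Int)))) (cur : List (List (String × Int))), cur ≠ [] →
      rest.foldl
        (fun (runs : List (List (List (String × Int)))) d =>
          if runs ≠ [] ∧ pvGetFlag ((runs.getLastD []).headD []) = pvGetFlag d then
            runs.dropLast ++ [runs.getLastD [] ++ [d]]
          else
            runs ++ [[d]])
        (acc ++ [cur]) = acc ++ pvRunsFrom cur rest := by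
  induction rest with
  | nil => intro acc cur _; simp [pvRunsFrom]
  | cons d rest ih =>
      intro acc cur hcur
      simp only [List.foldl_cons, pvRunsFrom]
      have hlast : (acc ++ [cur]).getLastD [] = cur := by simp
      have hdrop : (acc ++ [cur]).dropLast = acc := by simp
      by_cases h : pvGetFlag d = pvGetFlag (cur.headD [])
      · rw [if_pos ⟨by simp, by rw [hlast, h]⟩, if_pos h, hlast, hdrop,
          ih acc (cur ++ [d]) (by simp)]
      · rw [if_neg (by rw [hlast]; exact fun hc => h hc.2.symm), if_neg h]
        have := ih (acc ++ [cur]) [d] (by simp)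
        rw [this, List.append_assoc]
        simp

theorem pvEmit_eq_consume (rest : List (List (String × Int))) :
    ∀ cur, cur ≠ [] →
      pvEmit (pvRunsFrom cur rest) = pvConsume (pvGetFlag (cur.headD [])) cur rest := by
  induction rest with
  | nil => intro cur _; simp [pvRunsFrom, pvEmit, pvConsume]
  | cons d rest ih =>
      intro cur hcur
      simp only [pvRunsFrom, pvConsume]
      by_cases h : pvGetFlag d = pvGetFlag (cur.headD [])
      · rw [if_pos h, if_neg (by simpa using h),
          ih (cur ++ [d]) (by simp), headD_append _ _ _ hcur]
      · rw [if_neg h, if_pos (fun e => h e)]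
        obtain ⟨r2, more, hR⟩ := List.exists_cons_of_ne_nil (pvRunsFrom_ne_nil rest [d])
        have hhead : r2.headD ([] : List (String × Int)) = d := by
          have := pvRunsFrom_head rest [d] (by simp)
          rw [hR] at this; simpa using this
        rw [hR, pvEmit, hhead, ← hR, ih [d] (by simp)]
        simp

theorem pvZip_eq_emit (runs : List (List (List (String × Int)))) (h : runs ≠ []) :
    (runs.zip runs.tail).map
      (fun p => p.1 ++ [pvSetFlag (p.2.headD []) ((pvGetFlag (p.1.headD [])).getD 0)])
      ++ [runs.getLastD []] = pvEmit runs := by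
  induction runs with
  | nil => exact absurd rfl h
  | cons r rest ih =>
      cases rest with
      | nil => simp [pvEmit]
      | cons r2 more =>
          have ih' := ih (by simp)
          simp only [List.tail_cons] at ih'
          rw [show (r :: r2 :: more).tail = r2 :: more from rfl, List.zip_cons_cons, List.map_cons,
            pvEmit,
            show (r :: r2 :: more).getLastD [] = (r2 :: more).getLastD [] by
              cases more <;> simp [List.getLastD],
            List.cons_append, ih']

-- ===== VERDICT (by name: the statement is the Claim_ definition above) =====
theorem change_dict_distance_format_spec : Claim_equal_change_dict_distance_format := by
  intro l _ _
  unfold Spec_change_dict_distance_format change_dict_distance_format change_dict_distance_format_alt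
  cases l with
  | nil => simp [PySem.List.pyRange_one_eq_nil]
  | cons d rest =>
      -- A side
      rw [PySem.List.pyRange_one_cons (by simp)]
      simp only [List.foldl_cons]
      rw [pvFoldA_drop_first (d :: rest) (0 + 1) (by omega)]
      have h0 : PySem.List.pyGetD (d :: rest) (0 : Int) ([] : List (String × Int)) = d := by
        simp [PySem.List.pyGetD_zero_cons]
      have hA := pvFoldA_eq_consume rest [] [d] (pvGetFlag d)
      simp only [List.nil_append] at hA
      -- B side
      have hB1 : rest.foldl
          (fun (runs : List (List (List (String × Int)))) d =>
            if runs ≠ [] ∧ pvGetFlag ((runs.getLastD []).headD []) = pvGetFlag d then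
              runs.dropLast ++ [runs.getLastD [] ++ [d]]
            else
              runs ++ [[d]])
          (if ([] : List (List (List (String × Int)))) ≠ [] ∧
              pvGetFlag ((([] : List (List (List (String × Int)))).getLastD []).headD []) = pvGetFlag d then
            ([] : List (List (List (String × Int)))).dropLast ++
              [([] : List (List (List (String × Int)))).getLastD [] ++ [d]]
          else
            ([] : List (List (List (String × Int)))) ++ [[d]]) = pvRunsFrom [d] rest := by
        rw [if_neg (by simp)]
        exact pvFoldB_eq_runsFrom rest [] [d] (by simp)
      rw [hB1]
      rw [if_neg (pvRunsFrom_ne_nil rest [d])]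
      rw [pvZip_eq_emit _ (pvRunsFrom_ne_nil rest [d]), pvEmit_eq_consume rest [d] (by simp)]
      simp [h0, hA]
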